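-- pv_equiv track=rewrite | github.com/MuggleK/CaptchaVerify | GeeTest_Full.1.0/utils/tools.py | encrypt
-- ===== SOURCE A (Python) =====
-- def encrypt(e, t, r):
--     if not t or not r:
--         return e
--     n = 0
--     i = 2
--     a = e
--     s = t[0]
--     u = t[2]
--     c = t[4]
--     while n < len(r):
--         o = r[n:n + 2]
--         _ = int(o, 16)
--         f = chr(_)
--         l = (s * _ * _ + u * _ + c) % len(e)
--         a = a[0:l] + f + a[l:]
--         n += i
--     return a
-- ===== SOURCE B (Python) =====
-- def encrypt(e, t, r):
--     if not t or not r: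
--         return e
--     m = len(e)
--     s, u, c = t[0], t[2], t[4]
--     prefix = list(e)
--     tail = []
--     for n in range(0, len(r), 2):
--         v = int(r[n:n + 2], 16)
--         l = (s * v * v + u * v + c) % m
--         prefix.insert(l, chr(v))
--         tail.append(prefix.pop())
--     return ''.join(prefix) + ''.join(reversed(tail))
-- ===== Notes on version B (the rewrite author's own statement) =====
-- stated objective: alternative
-- what changed: Instead of re-slicing the ever-growing result string for every insert, B keeps a fixed-length prefix (list insert/pop) plus a reversed-tail accumulator, exploiting that every computed position is < len(e), and joins once at the end.
import Mathlib
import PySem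

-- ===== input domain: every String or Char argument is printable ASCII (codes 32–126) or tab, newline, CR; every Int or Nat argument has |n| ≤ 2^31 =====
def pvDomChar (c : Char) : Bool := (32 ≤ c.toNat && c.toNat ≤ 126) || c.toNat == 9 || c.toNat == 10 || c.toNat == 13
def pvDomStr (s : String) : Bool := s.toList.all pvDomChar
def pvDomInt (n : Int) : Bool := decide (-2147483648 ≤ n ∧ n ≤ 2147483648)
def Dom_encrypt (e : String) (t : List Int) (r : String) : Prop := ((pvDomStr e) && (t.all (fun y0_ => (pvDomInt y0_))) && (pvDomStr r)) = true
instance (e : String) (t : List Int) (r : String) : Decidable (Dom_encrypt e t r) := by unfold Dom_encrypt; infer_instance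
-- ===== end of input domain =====

-- B replaces A's repeated whole-string slicing (the working string grows every insert) by a fixed-length
-- prefix with insert/pop plus a reversed-tail accumulator: every computed position is < len(e), so each
-- insert pushes exactly the last prefix char onto the tail; a different organisation at similar cost.

-- ===== PORT A =====
-- while n < len(r): o = r[n:n+2]; _ = int(o,16); f = chr(_); l = (s*_*_+u*_+c) % len(e); a = a[0:l]+f+a[l:]; n += 2
-- int(o,16) is PySem.Int.ofCharsBase? (.getD 0: Pre_ guarantees success); chr(_) is Char.ofNat, exact for 0 ≤ _ < 0xD800 (here _ ≤ 0xFF under Pre_)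
def encryptA_loop (s u c : Int) (m : Nat) (rl : List Char) (n : Int) (a : List Char) : List Char :=
  if _h : n < (rl.length : Int) then
    let o := PySem.List.slice rl (some n) (some (n + 2))
    let v := (PySem.Int.ofCharsBase? o 16).getD 0
    let f := Char.ofNat v.toNat
    let l := PySem.Int.mod (s * v * v + u * v + c) (m : Int)
    encryptA_loop s u c m rl (n + 2)
      (PySem.List.slice a (some 0) (some l) ++ [f] ++ PySem.List.slice a (some l) none)
  else a
termination_by ((rl.length : Int) - n).toNat
decreasing_by omega

def encrypt (e : String) (t : List Int) (r : String) : String :=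
  if t = [] ∨ r = "" then e
  else
    let s := PySem.List.pyGetD t 0 0   -- t[0] (Pre_: 5 ≤ len t)
    let u := PySem.List.pyGetD t 2 0   -- t[2]
    let c := PySem.List.pyGetD t 4 0   -- t[4]
    String.ofList (encryptA_loop s u c e.toList.length r.toList 0 e.toList)

-- ===== PORT B =====
-- loop body: v = int(r[n:n+2],16); l = (s*v*v+u*v+c) % m; prefix.insert(l, chr(v)); tail.append(prefix.pop())
def encryptB_step (s u c : Int) (m : Nat) (rl : List Char) (st : List Char × List Char) (n : Int) :
    List Char × List Char :=
  let v := (PySem.Int.ofCharsBase? (PySem.List.slice rl (some n) (some (n + 2))) 16).getD 0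
  let l := PySem.Int.mod (s * v * v + u * v + c) (m : Int)
  let p1 := PySem.List.insert st.1 l (Char.ofNat v.toNat)
  match PySem.List.pop? p1 with          -- prefix.pop()
  | some (x, rest) => (rest, st.2 ++ [x])
  | none => (p1, st.2)                   -- unreachable: p1 ≠ []

def encrypt_alt (e : String) (t : List Int) (r : String) : String :=
  if t = [] ∨ r = "" then e
  else
    let s := PySem.List.pyGetD t 0 0
    let u := PySem.List.pyGetD t 2 0
    let c := PySem.List.pyGetD t 4 0
    let st := (PySem.List.pyRange 0 (r.toList.length : Int) 2).foldl
      (encryptB_step s u c e.toList.length r.toList) (e.toList, [])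
    String.ofList (st.1 ++ st.2.reverse)     -- ''.join(prefix) + ''.join(reversed(tail))

-- ===== PRECONDITION & SPEC =====
-- Pre_ = exactly where A returns: trivially when t or r is empty; otherwise t must have the indices
-- 0,2,4 (else IndexError), e nonempty (else ZeroDivisionError on % len(e)), and every two-char chunk
-- of r must parse as a nonnegative base-16 int (else ValueError from int(o,16) or chr of a negative).
def Pre_encrypt (e : String) (t : List Int) (r : String) : Prop :=
  t = [] ∨ r = "" ∨
    (5 ≤ t.length ∧ e ≠ "" ∧
      ∀ n ∈ PySem.List.pyRange 0 (r.toList.length : Int) 2,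
        0 ≤ (PySem.Int.ofCharsBase? (PySem.List.slice r.toList (some n) (some (n + 2))) 16).getD (-1))
instance (e : String) (t : List Int) (r : String) : Decidable (Pre_encrypt e t r) := by
  unfold Pre_encrypt; infer_instance

def pvWitness_encrypt : String × List Int × String := ("hello", [3, 9, 5, 2, 7], "1aF0")

def Spec_encrypt (e : String) (t : List Int) (r : String) (out : String) : Prop := out = encrypt_alt e t r
instance (e : String) (t : List Int) (r : String) (out : String) : Decidable (Spec_encrypt e t r out) := by
  unfold Spec_encrypt; infer_instance

-- ===== CLAIM (what is proved, stated in full; the proofs are below) =====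
def Claim_equal_encrypt : Prop := ∀ (e : String) (t : List Int) (r : String),
  Dom_encrypt e t r → Pre_encrypt e t r → Spec_encrypt e t r (encrypt e t r)

-- ===== LEMMAS AND PROOFS =====

theorem pyRange_two_nil (a b : Int) (h : b ≤ a) : PySem.List.pyRange a b 2 = [] := by
  rw [PySem.List.pyRange_of_pos a b (by norm_num)]
  simp [show ¬ a < b by omega]

theorem pyRange_two_cons (a b : Int) (h : a < b) :
    PySem.List.pyRange a b 2 = a :: PySem.List.pyRange (a + 2) b 2 := by
  rw [PySem.List.pyRange_of_pos a b (by norm_num), PySem.List.pyRange_of_pos (a + 2) b (by norm_num)]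
  by_cases h2 : a + 2 < b
  · rw [if_pos h, if_pos h2,
      show ((b - a + 2 - 1) / 2).toNat = ((b - (a + 2) + 2 - 1) / 2).toNat + 1 by omega,
      List.range_succ_eq_map]
    simp only [List.map_cons, List.map_map]
    refine List.cons_eq_cons.mpr ⟨by omega, ?_⟩
    exact List.map_congr_left (fun k _ => by simp [Function.comp]; omega)
  · rw [if_pos h, if_neg h2, show ((b - a + 2 - 1) / 2).toNat = 1 by omega]
    simp

-- loop invariant: the A-side working string is always prefix ++ reverse tail, with |prefix| = len e
theorem loop_eq (s u c : Int) (m : Nat) (hm : 0 < m) (rl : List Char) (n : Int)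
    (P Tr : List Char) (hP : P.length = m) :
    encryptA_loop s u c m rl n (P ++ Tr.reverse) =
      ((PySem.List.pyRange n (rl.length : Int) 2).foldl (encryptB_step s u c m rl) (P, Tr)).1 ++
      ((PySem.List.pyRange n (rl.length : Int) 2).foldl (encryptB_step s u c m rl) (P, Tr)).2.reverse := by
  by_cases h : n < (rl.length : Int)
  · rw [pyRange_two_cons n _ h, List.foldl_cons]
    set v := (PySem.Int.ofCharsBase? (PySem.List.slice rl (some n) (some (n + 2))) 16).getD 0 with hv
    set l := PySem.Int.mod (s * v * v + u * v + c) (m : Int) with hl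
    have hl0 : 0 ≤ l := PySem.Int.mod_nonneg _ (by exact_mod_cast hm)
    have hlm : l < (m : Int) := PySem.Int.mod_lt _ (by exact_mod_cast hm)
    set k := l.toNat with hk
    have hkm : k < m := by omega
    have hins : PySem.List.insert P l (Char.ofNat v.toNat) =
        P.take k ++ Char.ofNat v.toNat :: P.drop k := by
      rw [show l = ((k : Nat) : Int) by omega]
      exact PySem.List.insert_natCast P k _ (by omega)
    have hdropne : P.drop k ≠ [] := by
      intro hcon
      have := List.length_drop (l := P) (i := k)
      rw [hcon] at this
      simp at this; omega
    set x := (P.drop k).getLast hdropne with hx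
    have hsplit : P.drop k = (P.drop k).dropLast ++ [x] := (List.dropLast_append_getLast hdropne).symm
    have hstep : encryptB_step s u c m rl (P, Tr) n =
        (P.take k ++ Char.ofNat v.toNat :: (P.drop k).dropLast, Tr ++ [x]) := by
      unfold encryptB_step
      simp only [← hv, ← hl, hins]
      rw [show P.take k ++ Char.ofNat v.toNat :: P.drop k =
            (P.take k ++ Char.ofNat v.toNat :: (P.drop k).dropLast) ++ [x] by
          conv_lhs => rw [hsplit]
          simp,
        PySem.List.pop?_last]
    have hlen : (P.take k ++ Char.ofNat v.toNat :: (P.drop k).dropLast).length = m := by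
      have h1 : (P.take k).length = k := by simp; omega
      have h2 : ((P.drop k).dropLast).length = P.length - k - 1 := by simp
      simp [h1, h2]; omega
    rw [hstep]
    rw [encryptA_loop]
    rw [dif_pos h]
    simp only [← hv, ← hl]
    have hslice0 : PySem.List.slice (P ++ Tr.reverse) (some 0) (some l) = P.take k := by
      rw [PySem.List.slice_zero_start, PySem.List.slice_to _ hl0, ← hk,
        List.take_append_of_le_length (by omega)]
    have hslice1 : PySem.List.slice (P ++ Tr.reverse) (some l) none = P.drop k ++ Tr.reverse := by
      rw [PySem.List.slice_from _ hl0, ← hk, List.drop_append_of_le_length (by omega)]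
    rw [hslice0, hslice1]
    have harr : P.take k ++ [Char.ofNat v.toNat] ++ (P.drop k ++ Tr.reverse) =
        (P.take k ++ Char.ofNat v.toNat :: (P.drop k).dropLast) ++ (Tr ++ [x]).reverse := by
      conv_lhs => rw [hsplit]
      simp
    rw [harr]
    exact loop_eq s u c m hm rl (n + 2) _ (Tr ++ [x]) hlen
  · rw [pyRange_two_nil n _ (by omega), List.foldl_nil]
    rw [encryptA_loop, dif_neg h]
termination_by ((rl.length : Int) - n).toNat
decreasing_by omega

-- ===== VERDICT (by name: the statement is the Claim_ definition above) =====
theorem encrypt_spec : Claim_equal_encrypt := by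
  intro e t r _hdom hpre
  unfold Spec_encrypt encrypt encrypt_alt
  by_cases hb : t = [] ∨ r = ""
  · rw [if_pos hb, if_pos hb]
  · rw [if_neg hb, if_neg hb]
    have he : e ≠ "" := by
      rcases hpre with h | h | h
      · exact absurd (Or.inl h) hb
      · exact absurd (Or.inr h) hb
      · exact h.2.1
    have hm : 0 < e.toList.length := by
      cases hel : e.toList with
      | nil => exact absurd (by cases e; simpa using hel) he
      | cons a l => simp
    have := loop_eq (PySem.List.pyGetD t 0 0) (PySem.List.pyGetD t 2 0) (PySem.List.pyGetD t 4 0)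
      e.toList.length hm r.toList 0 e.toList [] rfl
    simp only [List.reverse_nil, List.append_nil] at this
    exact congrArg String.ofList this
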